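-- pv_equiv track=rewrite | github.com/kabirarora108/leetcodee | 4168-mirror-distance-of-an-integer/mirror-distance-of-an-integer.py | mirrorDistance
-- ===== SOURCE A (Python) =====
-- def mirrorDistance(n: int) -> int:
--     def reverse(x: int) -> int:
--         rev = 0
--         while x > 0:
--             rev = rev * 10 + x % 10
--             x //= 10
--         return rev
--
--     return abs(n - reverse(n))
-- ===== SOURCE B (Python) =====
-- def mirrorDistance(n: int) -> int:
--     if n <= 0:
--         return abs(n)
--     r = sum((ord(c) - 48) * 10**i for i, c in enumerate(str(n)))
--     return abs(n - r)
-- ===== Notes on version B (the rewrite author's own statement) =====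
-- stated objective: alternative
-- what changed: B computes the reversed number as a positional weighted sum over the decimal string: each digit at string index i (most significant first) is multiplied by the i-th power of ten and the products are summed, instead of A's Horner-style while-loop that repeatedly takes the last digit by modulo and floor division and accumulates it into a running value.
import Mathlib
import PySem

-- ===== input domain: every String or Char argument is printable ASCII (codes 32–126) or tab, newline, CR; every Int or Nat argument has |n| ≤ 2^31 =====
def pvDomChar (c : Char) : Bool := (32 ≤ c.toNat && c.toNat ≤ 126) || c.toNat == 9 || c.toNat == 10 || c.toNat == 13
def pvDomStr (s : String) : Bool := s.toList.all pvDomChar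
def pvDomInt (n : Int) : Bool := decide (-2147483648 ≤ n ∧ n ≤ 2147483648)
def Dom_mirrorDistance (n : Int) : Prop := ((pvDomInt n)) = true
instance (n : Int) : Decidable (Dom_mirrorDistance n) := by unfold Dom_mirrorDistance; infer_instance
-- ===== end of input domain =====

-- B computes the reverse as a positional weighted sum over enumerate(str(n)) (digit at
-- string index i times 10**i) instead of A's %10 // 10 Horner while-loop; alternative algorithm.


-- ===== PORT A =====
-- A's inner helper `reverse`: while x > 0: rev = rev*10 + x%10; x //= 10
def pvRevA (x rev : Int) : Int :=
  if h : 0 < x then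
    pvRevA (PySem.Int.floordiv x 10) (rev * 10 + PySem.Int.mod x 10)
  else rev
  termination_by x.toNat
  decreasing_by
    rw [PySem.Int.floordiv_eq_ediv_of_pos (by norm_num)]
    omega

def mirrorDistance (n : Int) : Int := |n - pvRevA n 0|

-- ===== PORT B =====
-- if n <= 0: return abs(n); r = sum((ord(c)-48) * 10**i for i, c in enumerate(str(n))); return abs(n-r)
def mirrorDistance_alt (n : Int) : Int :=
  if n ≤ 0 then |n|
  else
    let r : Int :=
      (PySem.List.enumerate (PySem.Int.toChars n)).foldl
        (fun acc p => acc + ((p.2.toNat : Int) - 48) * 10 ^ p.1.toNat) 0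
    |n - r|

-- ===== PRECONDITION & SPEC =====
def Spec_mirrorDistance (n : Int) (out : Int) : Prop := out = mirrorDistance_alt n
instance (n : Int) (out : Int) : Decidable (Spec_mirrorDistance n out) := by unfold Spec_mirrorDistance; infer_instance

-- ===== CLAIM (what is proved, stated in full; the proofs are below) =====
def Claim_equal_mirrorDistance : Prop := ∀ (n : Int), Dom_mirrorDistance n → Spec_mirrorDistance n (mirrorDistance n)

-- ===== LEMMAS AND PROOFS =====

-- proof-only helper: Σ val(l_i) * 10^i over a digit-char list
def pvSumW (l : List Char) : Int :=
  l.foldr (fun c acc => ((c.toNat : Int) - 48) + 10 * acc) 0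

theorem pvSumW_append_singleton (l : List Char) (c : Char) :
    pvSumW (l ++ [c]) = pvSumW l + 10 ^ l.length * ((c.toNat : Int) - 48) := by
  induction l with
  | nil => simp [pvSumW]
  | cons x t ih =>
    simp only [List.cons_append, pvSumW, List.foldr_cons] at *
    rw [ih]
    simp only [List.length_cons]
    ring

theorem pvRevA_nonpos (x rev : Int) (h : ¬ 0 < x) : pvRevA x rev = rev := by
  rw [pvRevA]; simp [h]

theorem pvDigitCharVal (d : Nat) (h : d < 10) :
    ((Nat.digitChar d).toNat : Int) - 48 = (d : Int) := by
  interval_cases d <;> decide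

-- B's weighted fold over enumerate equals pvSumW (scaled by the start weight).
theorem pvFoldB (l : List Char) (s : Int) (hs : 0 ≤ s) (acc : Int) :
    (PySem.List.enumerate l s).foldl
        (fun acc p => acc + ((p.2.toNat : Int) - 48) * 10 ^ p.1.toNat) acc
      = acc + 10 ^ s.toNat * pvSumW l := by
  induction l generalizing s acc with
  | nil => simp [PySem.List.enumerate_nil, pvSumW]
  | cons c t ih =>
    rw [PySem.List.enumerate_cons, List.foldl_cons, ih (s + 1) (by omega)]
    have h1 : (s + 1).toNat = s.toNat + 1 := by omega
    simp only [pvSumW, List.foldr_cons, h1]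
    ring

-- A's accumulator loop equals the weighted digit sum of Nat.toDigits.
theorem pvRevA_eq_sumW (m : Nat) (hm : 0 < m) (rev : Int) :
    pvRevA (m : Int) rev
      = rev * 10 ^ (Nat.toDigits 10 m).length + pvSumW (Nat.toDigits 10 m) := by
  induction m using Nat.strong_induction_on generalizing rev with
  | _ m ih =>
    rw [pvRevA]
    have hpos : 0 < (m : Int) := by exact_mod_cast hm
    rw [dif_pos hpos]
    have hfd : PySem.Int.floordiv (m : Int) 10 = ((m / 10 : Nat) : Int) := by
      exact_mod_cast PySem.Int.floordiv_natCast m 10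
    have hmd : PySem.Int.mod (m : Int) 10 = ((m % 10 : Nat) : Int) := by
      exact_mod_cast PySem.Int.mod_natCast m 10
    rw [hfd, hmd]
    rw [Nat.toDigits_eq_if (by norm_num)]
    by_cases hlt : m < 10
    · rw [if_pos hlt]
      have h0 : m / 10 = 0 := Nat.div_eq_of_lt hlt
      have hm10 : m % 10 = m := Nat.mod_eq_of_lt hlt
      rw [h0, hm10, pvRevA_nonpos _ _ (by simp)]
      simp [pvSumW, pvDigitCharVal m hlt]
    · rw [if_neg hlt]
      rw [ih (m / 10) (Nat.div_lt_self hm (by norm_num))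
        (Nat.div_pos (by omega) (by norm_num))]
      rw [pvSumW_append_singleton, List.length_append,
        pvDigitCharVal (m % 10) (Nat.mod_lt _ (by norm_num))]
      simp only [List.length_singleton]
      ring

-- ===== VERDICT (by name: the statement is the Claim_ definition above) =====
theorem mirrorDistance_spec : Claim_equal_mirrorDistance := by
  intro n _
  unfold Spec_mirrorDistance mirrorDistance mirrorDistance_alt
  by_cases h : n ≤ 0
  · rw [if_pos h, pvRevA_nonpos n 0 (by omega)]
    simp
  · rw [if_neg h]
    have hn : ((n.toNat : Nat) : Int) = n := Int.toNat_of_nonneg (by omega)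
    have ht : PySem.Int.toChars n = Nat.toDigits 10 n.toNat := by
      unfold PySem.Int.toChars
      rw [if_neg (by omega)]
    rw [ht, pvFoldB _ 0 le_rfl 0]
    conv_lhs => rw [← hn]
    rw [pvRevA_eq_sumW n.toNat (by omega) 0, hn]
    simp
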